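/-
  THE FLOOR PREDICATES AT WORK (Vorbis/Floor.lean): each structure used the way a function proof uses it.
      (a) check sites of do_floor and of the floor part of vorbis_decode_packet_rest, in the shapes the stepper leaves
      (b) the facts the clauses give about VALUES (book indices, predict_point's divisor, the range constants)
      (c) FRAME: the structures carried over one store of the walker, over an allocator call (`ObjSame`), over decode-time
          stores (`DecodeSame`), through the struct copy `*f = p` (`Copied`), and into another block predicate
      (d) ESTABLISH: steps of start_decoder's floor loops over concrete stores; PID across qsort; FL9; FY1
      (e) `Group.Moves` / `Group.Carries` of the two groups, the way the top of the invariant assembles them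
  A worker has, at a check site: `hc : Covers Live mem` (ShadowInv.covers), `hL : BlkLive Blk Live`, and the group `h`.
-/
import Vorbis.Floor
namespace Vorbis.FloorTest
open X86 X86.User Asan Vorbis

/-! ### (a) Check sites -/

/-- THE PATTERN, in three lines: the `Site` from the group's USE lemma, then the check from the `Site`. -/
example (Blk : Block → Prop) (Live : Nat → Prop) (mem : Mem) (f g : Nat) (hc : Covers Live mem) (hL : BlkLive Blk Live)
    (h : FloorsOK Blk mem f) (hg : IsFloor mem f g) : AccessibleSmall mem (g + 1592) 4 := by
  have s := h.site_values hL hg (a := g + 1592) (by simp only [voff])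
  exact s.acc hc

/-- The same for the group FY1: `finalY[c][1]` (`values ≥ 2` by FL8). -/
example (Blk : Block → Prop) (Live : Nat → Prop) (mem : Mem) (f g c : Nat) (hc : Covers Live mem) (hL : BlkLive Blk Live)
    (h : FloorsOK Blk mem f) (hy : FY1 Blk mem f) (hg : IsFloor mem f g) (hch : (c : Int) < stb_vorbis.channels mem f) :
    AccessibleSmall mem (stb_vorbis.finalY mem f c + 2) 2 := by
  have hv := (h.floor hg).values_bounds
  have s := hy.site hL hch hg (j := 1) (by omega) (a := stb_vorbis.finalY mem f c + 2) (by omega)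
  exact s.acc hc

/-- do_floor 0x108add, `load1 g + 0x346 + q` (`j = g->sorted_order[q]`), `rdi = rbx + r12 + 838` with `rbx = g`, `r12 = q`,
`q < g->values` from the loop test: FL8 bounds the index, FL2 gives the block. -/
example (Blk : Block → Prop) (Live : Nat → Prop) (mem : Mem) (f g q : Nat) (hc : Covers Live mem) (hL : BlkLive Blk Live)
    (h : FloorsOK Blk mem f) (hg : IsFloor mem f g) (hq : (q : Int) < Floor1.values mem g) :
    AccessibleSmall mem (addr (g + q + 838)).toNat 1 := by
  have hq250 := (h.floor hg).idx_lt_250 hq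
  exact (h.site_sorted_order hL hg (by simp only [voff]; omega) (by simp only [voff]; omega)).acc_addr hc

/-- do_floor 0x108af8, `load2 finalY + 2 * j` with `j = sorted_order[q]`: FL9 puts `j` below `values`, FY1 gives the block. The
side condition of the load itself comes from the same `Site`. -/
example (L : Layout) (Blk : Block → Prop) (Live : Nat → Prop) (mem : Mem) (f g c q : Nat) (hc : Covers Live mem)
    (hL : BlkLive Blk Live) (h : FloorsOK Blk mem f) (hy : FY1 Blk mem f) (hg : IsFloor mem f g)
    (hch : (c : Int) < stb_vorbis.channels mem f) (hq : (q : Int) < Floor1.values mem g) (hLay : 0xC00000 ≤ L.hi) :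
    AccessibleSmall mem (addr (stb_vorbis.finalY mem f c + Floor1.sorted_order mem g q * 2)).toNat 2
      ∧ L.Has (addr (stb_vorbis.finalY mem f c + Floor1.sorted_order mem g q * 2)) 2 := by
  have hj := ((h.floor hg).sorted_lt hq).1
  have s := hy.site hL hch hg hj (a := stb_vorbis.finalY mem f c + Floor1.sorted_order mem g q * 2) (by omega)
  exact ⟨s.acc_addr hc, s.has hc hLay⟩

/-- do_floor 0x108b31, `load2 g + 0x152 + 2 * j` as the stepper leaves it: `rdi = addr g + addr j * 2 + 338`. -/
example (Blk : Block → Prop) (Live : Nat → Prop) (mem : Mem) (f g j : Nat) (hc : Covers Live mem) (hL : BlkLive Blk Live)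
    (h : FloorsOK Blk mem f) (hg : IsFloor mem f g) (hj : (j : Int) < Floor1.values mem g) :
    AccessibleSmall mem (addr g + addr j * 2 + 338).toNat 2 := by
  simp only [vfield]
  have hj250 := (h.floor hg).idx_lt_250 hj
  exact (h.site_Xlist hL hg (by simp only [voff]; omega) (by simp only [voff]; omega)).acc_addr hc

/-- The same site for an index that is only known to be a byte (before FL9 is applied): still inside the element. -/
example (Blk : Block → Prop) (Live : Nat → Prop) (mem : Mem) (f g j : Nat) (hc : Covers Live mem) (hL : BlkLive Blk Live)
    (h : FloorShape Blk mem f) (hg : IsFloor mem f g) (hj : j < 256) : AccessibleSmall mem (g + 338 + 2 * j) 2 :=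
  (h.site_elem hL hg (338 + 2 * j) 2 (by simp only [voff]; omega) (by omega) (by omega)).acc hc

/-- vorbis_decode_packet_rest 0x110d3a, `load2 g + 0x52 + 16 * pclass + 2 * idx` compiled as `[r13 + rbx * 2 + 2]` with
`rbx = idx + pclass * 8 + 40`, `idx = cval & csub`, `pclass = pcl[j]`: FL5 and FL6 bound both indices, for ANY `cval`. -/
example (Blk : Block → Prop) (Live : Nat → Prop) (mem : Mem) (f g j x : Nat) (hc : Covers Live mem) (hL : BlkLive Blk Live)
    (h : FloorsOK Blk mem f) (hg : IsFloor mem f g) (hj : j < Floor1.partitions mem g) :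
    AccessibleSmall mem
      (g + ((x &&& (2 ^ Floor1.class_subclasses mem g (Floor1.partition_class_list mem g j) - 1))
            + Floor1.partition_class_list mem g j * 8 + 40) * 2 + 2) 2 := by
  have hcl := (h.floor hg).class_lt hj
  have hk := (h.floor hg).book_idx_lt hj x
  exact (h.site_subclass_books hL hg hcl hk (by simp only [voff]; omega)).acc hc

/-- vorbis_decode_packet_rest 0x110cf8, `store2 finalY + 2 * offset` inside partition `j`, element `k`: the Σ invariant
against FL8, then FY1. -/
example (Blk : Block → Prop) (Live : Nat → Prop) (mem : Mem) (f g c j k : Nat) (hc : Covers Live mem)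
    (hL : BlkLive Blk Live) (h : FloorsOK Blk mem f) (hy : FY1 Blk mem f) (hg : IsFloor mem f g)
    (hch : (c : Int) < stb_vorbis.channels mem f) (hj : j < Floor1.partitions mem g)
    (hk : k < Floor1.class_dimensions mem g (Floor1.partition_class_list mem g j)) :
    AccessibleSmall mem (stb_vorbis.finalY mem f c + 2 * (2 + Floor1.dimSum mem g j + k)) 2 :=
  (hy.site hL hch hg ((h.floor hg).offset_lt hj hk) rfl).acc hc

/-- vorbis_decode_packet_rest 0x111104 / 0x111123, `load2 finalY + 2 * high`, `load2 finalY + 2 * low`: FL10. -/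
example (Blk : Block → Prop) (Live : Nat → Prop) (mem : Mem) (f g c j : Nat) (hc : Covers Live mem) (hL : BlkLive Blk Live)
    (h : FloorsOK Blk mem f) (hy : FY1 Blk mem f) (hg : IsFloor mem f g) (hch : (c : Int) < stb_vorbis.channels mem f)
    (h2 : 2 ≤ j) (hj : (j : Int) < Floor1.values mem g) :
    AccessibleSmall mem (stb_vorbis.finalY mem f c + 2 * Floor1.neighbors mem g j 1) 2
      ∧ AccessibleSmall mem (stb_vorbis.finalY mem f c + 2 * Floor1.neighbors mem g j 0) 2 := by
  have hn := (h.floor hg).nb_lt h2 hj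
  exact ⟨(hy.site hL hch hg hn.2 rfl).acc hc, (hy.site hL hch hg hn.1 rfl).acc hc⟩

/-- `f->floor_types[i]` (a field of `*f`): OB1's block, `i < floor_count ≤ 64`. -/
example (Blk : Block → Prop) (Live : Nat → Prop) (mem : Mem) (f i : Nat) (hc : Covers Live mem) (hL : BlkLive Blk Live)
    (hob : Blk (objBlock f)) (h : FloorsOK Blk mem f) (hi : (i : Int) < stb_vorbis.floor_count mem f) :
    AccessibleSmall mem (f + 180 + 2 * i) 2 :=
  (site_floor_types hL hob (h.idx_lt_64 hi) (by simp only [voff])).acc hc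

/-- `step2_flag[high]` (store1 at `rsp + 0x140 + high`): `high` is a zero-extended byte, nothing else is needed. The stack object
is live by `ShadowInv.live_frame`. -/
example (Live : Nat → Prop) (mem : Mem) (S g j : Nat) (hc : Covers Live mem) (hS : (Block.mk S 256).live Live) :
    AccessibleSmall mem (S + Floor1.neighbors mem g j 1) 1 :=
  (site_step2_flag hS (Floor1.neighbors_lt mem g j 1) rfl).acc hc

/-- `inverse_db_table[y & 255]` (draw_line 0x1087c4, do_floor 0x108b90 = FIX 11): the index is `movzx` of a byte. -/
example (Live : Nat → Prop) (mem : Mem) (T : Nat) (y : BitVec 8) (hc : Covers Live mem) (hT : (Block.mk T 1024).live Live) :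
    AccessibleSmall mem (T + 4 * y.toNat) 4 :=
  (site_inverse_db hT y.isLt rfl).acc hc

/-- `range_list[g->floor1_multiplier - 1]` (0x1113bc): FL7. -/
example (Blk : Block → Prop) (Live : Nat → Prop) (mem : Mem) (f g R : Nat) (hc : Covers Live mem) (h : FloorsOK Blk mem f)
    (hg : IsFloor mem f g) (hR : (Block.mk R 16).live Live) :
    AccessibleSmall mem (R + 4 * (Floor1.floor1_multiplier mem g - 1)) 4 :=
  (site_range_list hR (h.floor hg).FL7 rfl).acc hc

/-- draw_line 0x108805, `load4 output + 4 * x` in the loop: `x0 < x < x1'` with the clamp, `0 ≤ x0`. The channel buffer `O` is an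
allocated block: live through `hL`. -/
example (Blk : Block → Prop) (Live : Nat → Prop) (mem : Mem) (O : Block) (out : Nat) (x0 x x1 n : Int)
    (hc : Covers Live mem) (hL : BlkLive Blk Live) (hO : Blk O) (hin : O.contains out (4 * n.toNat)) (h0 : 0 ≤ x0)
    (hx0 : x0 < x) (hx : x < (if n < x1 then n else x1)) : AccessibleSmall mem (out + 4 * x.toNat) 4 := by
  have hb := drawLine_index x0 x x1 n h0 (by omega) hx
  exact (site_output (hL O hO) hin hb.1 hb.2 rfl).acc hc

/-- start_decoder 0x11569f, `store2 g + 0x152 + 2 * values` in loop 4009, BEFORE the floor is complete: only the shape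
(FL1, FL2) and the closed form `values = 2 + Σ_{j' < j} + k ≤ 249`. -/
example (Blk : Block → Prop) (Live : Nat → Prop) (mem : Mem) (f g j k : Nat) (hc : Covers Live mem) (hL : BlkLive Blk Live)
    (h : FloorShape Blk mem f) (hg : IsFloor mem f g) (hp : Floor1.partitions mem g ≤ 31)
    (hj : j < Floor1.partitions mem g)
    (hd : ∀ j', j' < Floor1.partitions mem g →
      Floor1.class_dimensions mem g (Floor1.partition_class_list mem g j') ≤ 8)
    (hk : k < Floor1.class_dimensions mem g (Floor1.partition_class_list mem g j)) :
    AccessibleSmall mem (g + 338 + 2 * (2 + Floor1.dimSum mem g j + k)) 2 := by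
  have hv := xlist_store_le_249 (fun j => Floor1.class_dimensions mem g (Floor1.partition_class_list mem g j)) hj hp hd hk
  exact (h.site_Xlist hL hg (j := 2 + Floor1.dimSum mem g j + k) (by simp only [voff]; unfold Floor1.dimSum; omega)
    (by simp only [voff])).acc hc

/-! ### (b) Values -/

/-- `c = f->codebooks + book` under `book ≥ 0`: the index of the codebook is below `codebook_count` (then CB0 of Q4). -/
example (Blk : Block → Prop) (mem : Mem) (f g j x : Nat) (h : FloorsOK Blk mem f) (hg : IsFloor mem f g)
    (hj : j < Floor1.partitions mem g)
    (hb : 0 ≤ Floor1.subclass_books mem g (Floor1.partition_class_list mem g j)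
      (x &&& (2 ^ Floor1.class_subclasses mem g (Floor1.partition_class_list mem g j) - 1))) :
    (Floor1.subclass_books mem g (Floor1.partition_class_list mem g j)
      (x &&& (2 ^ Floor1.class_subclasses mem g (Floor1.partition_class_list mem g j) - 1))).toNat
      < (stb_vorbis.codebook_count mem f).toNat := by
  have hr := (h.floor hg).book_range hj x
  omega

/-- predict_point's `idiv r13d`, `r13d = x1 - x0 = Xlist[high] - Xlist[low]`: positive, so neither #DE case. -/
example (Blk : Block → Prop) (mem : Mem) (f g j : Nat) (h : FloorsOK Blk mem f) (hg : IsFloor mem f g) (h2 : 2 ≤ j)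
    (hj : (j : Int) < Floor1.values mem g) :
    (Floor1.Xlist mem g (Floor1.neighbors mem g j 1) : Int) - Floor1.Xlist mem g (Floor1.neighbors mem g j 0) ≠ 0 ∧
      (Floor1.Xlist mem g (Floor1.neighbors mem g j 1) : Int) - Floor1.Xlist mem g (Floor1.neighbors mem g j 0) ≠ -1 := by
  have ha := (h.floor hg).adx_pos h2 hj
  omega

/-- The dead branch `f->floor_types[floor] == 0` of do_floor / vorbis_decode_packet_rest. -/
example (Blk : Block → Prop) (mem : Mem) (f i : Nat) (h : FloorsOK Blk mem f)
    (hi : (i : Int) < stb_vorbis.floor_count mem f) : stb_vorbis.floor_types mem f i ≠ 0 :=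
  h.type_ne_zero hi

/-- `range` is one of the four constants. -/
example (mem : Mem) (R g : Nat) (hr : RangeListOK mem R) (h7 : 1 ≤ Floor1.floor1_multiplier mem g ∧ Floor1.floor1_multiplier mem g ≤ 4) :
    64 ≤ mem.i32 (R + 4 * (Floor1.floor1_multiplier mem g - 1)) :=
  (hr.bounds h7).1

/-- do_floor: `dy = hy - ly` is not `INT_MIN` (draw_line's second #DE case), for any contents of finalY and any byte `mult`. -/
example (mem : Mem) (a b : Nat) (m : Nat) (hm : m < 256) :
    mem.i16 a * (m : Int) - mem.i16 b * (m : Int) ≠ -2147483648 := by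
  have h1 := mul_i16_u8_bound (mem.i16 a) m (mem.i16_range a) hm
  have h2 := mul_i16_u8_bound (mem.i16 b) m (mem.i16_range b) hm
  omega

/-- The finalY block of a channel and the block of FL2 are different allocated blocks, hence disjoint (`BlkOK.disjoint`):
the disjointness hypotheses of `store` below come from the block predicate, not from the live set. -/
example (Blk : Block → Prop) (mem : Mem) (f g c : Nat) (hok : BlkOK Blk) (h : FloorsOK Blk mem f) (hy : FY1 Blk mem f)
    (hg : IsFloor mem f g) (hch : (c : Int) < stb_vorbis.channels mem f)
    (hne : stb_vorbis.finalY mem f c ≠ stb_vorbis.floor_config mem f) :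
    ∃ sz : Nat, (floorBlock mem f).disjoint ⟨stb_vorbis.finalY mem f c, sz⟩ := by
  obtain ⟨sz, hblk, _⟩ := hy.block hch hg
  exact ⟨sz, hok.disjoint_of_base h.FL2 hblk (fun e => hne e.symm)⟩

/-! ### (c) Frame -/

/-- `finalY[offset] = temp`: a store into a finalY block `Y` (an allocated block other than `*f` and the floor block) keeps
FL1 … FL10 and FY1. -/
example (Blk : Block → Prop) (mem : Mem) (f b v : Nat) (Y : Block) (hok : BlkOK Blk) (hob : Blk (objBlock f))
    (h : FloorsOK Blk mem f) (hy : FY1 Blk mem f) (hY : Blk Y) (hin : Y.contains b 2) (hnf : objBlock f ≠ Y)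
    (hng : floorBlock mem f ≠ Y) (h16 : stb_vorbis.channels mem f ≤ 16) :
    FloorsOK Blk (mem.writeLE (addr b) 2 v) f ∧ FY1 Blk (mem.writeLE (addr b) 2 v) f := by
  have hdf := hok.disjoint hob hY hnf
  have hdg := hok.disjoint h.FL2 hY hng
  have hYtop := hok.no_wrap hY
  constructor
  · exact h.store hok hob b 2 v hin (floorHdr_disjoint hdf) hdg hYtop
  · exact hy.store h.toFloorShape hok hob b 2 v hin hdf hdg hYtop h16

/-- `f->valid_bits = …` (the inline DECODE's unchecked store at `f + 1768`): a store INTO `*f`, outside the header fields. -/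
example (Blk : Block → Prop) (mem : Mem) (f v : Nat) (hok : BlkOK Blk) (hob : Blk (objBlock f)) (h : FloorsOK Blk mem f)
    (hdg : (floorBlock mem f).disjoint (objBlock f)) :
    FloorsOK Blk (mem.writeLE (addr (f + 1768)) 4 v) f := by
  have hfin := stb_vorbis_inside hok hob
  simp only [voff] at hfin
  apply h.store hok hob (C := Block.mk (f + 1768) 4) (f + 1768) 4 v
  · simp only [vblock]
    omega
  · simp only [floorHdr, vblock, voff]
    omega
  · simp only [floorBlock, vblock, voff] at hdg ⊢
    omega
  · simp only []
    omega

/-- The same store through the two-address lemma: `DecodeSame` (what decode-time code leaves of `*f`) contains the windows of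
the group; the floor block is kept because the store goes into another allocated block (`*f`). -/
example (Blk : Block → Prop) (mem : Mem) (f v : Nat) (hok : BlkOK Blk) (hob : Blk (objBlock f)) (h : FloorsOK Blk mem f)
    (hne : floorBlock mem f ≠ objBlock f) : FloorsOK Blk (mem.writeLE (addr (f + 1768)) 4 v) f := by
  have hfin := stb_vorbis_inside hok hob
  simp only [voff] at hfin
  have ea : (addr (f + 1768)).toNat = f + 1768 := toNat_addr _ (by omega)
  have hd : DecodeSame f mem (mem.writeLE (addr (f + 1768)) 4 v) := by
    apply DecodeSame.of_writeLE mem f _ 4 v (by omega) (by simp only [voff]; omega)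
    omega
  apply h.transfer (hd.sub (by decide)) _ (fun _ _ hb => hb)
  intro B hR
  apply hok.kept_store (h.reads_blk hR) hob _ mem v (b := f + 1768) (k := 4)
  · simp only [vblock, voff]
    omega
  · cases hR with
    | config => exact hne

/-- **`transfer` from `ObjSame`** (an allocator call: `setup_malloc` changes `setup_offset` only, and writes no allocated
block): both groups survive. `AllKept` gives the `hk`, through `reads_blk` / FL2. -/
example (Blk : Block → Prop) (mem mem' : Mem) (f : Nat) (h : FloorsOK Blk mem f) (hy : FY1 Blk mem f)
    (hC : stb_vorbis.channels mem f ≤ 16) (hs : ObjSame f mem mem') (hall : AllKept Blk mem mem') :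
    FloorsOK Blk mem' f ∧ FY1 Blk mem' f := by
  constructor
  · exact h.frame hs (fun B hR => hall B (h.reads_blk hR))
  · apply hy.frame h.toFloorShape hC hs
    intro B hR
    cases hR with
    | config => exact hall _ h.FL2

/-- **`transfer` from a `Copied`** (stb_vorbis_open_memory: `*f = p` by `memcpy(f, &p, 1808)`): the clauses of the stack object
`p` in `mem` become the clauses of the arena copy `f` in `mem'`. The blocks the floor clauses point to are not moved; they are
kept because memcpy's target is fresh (`Move.kept`), and still allocated because nothing was freed (`Move.sub`). -/
example (Blk Blk' : Block → Prop) (mem mem' : Mem) (p f : Nat) (hm : Move Blk Blk' mem mem' p f)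
    (h : FloorsOK Blk mem p) (hy : FY1 Blk mem p) (hC : stb_vorbis.channels mem p ≤ 16) :
    FloorsOK Blk' mem' f ∧ FY1 Blk' mem' f := by
  have hcp : Copied mem p mem' f Off.sizeof.stb_vorbis := hm.copied
  constructor
  · apply h.transfer (ObjEq.of_copied hcp (by decide))
    · intro B hR
      exact hm.kept (h.reads_blk hR)
    · intro B _ hb
      exact hm.sub B hb
  · apply hy.transfer h.toFloorShape hC (ObjEq.of_copied hcp (by decide))
    · intro B hR
      cases hR with
      | config => exact hm.kept h.FL2
    · intro B _ hb
      exact hm.sub B hb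

/-- **Another block predicate** (the arena grew by one block; a frame was popped and its stack objects left `Blk`): the groups
only ask that THEIR blocks are still allocated. -/
example (Blk Blk' : Block → Prop) (mem : Mem) (f : Nat) (h : FloorsOK Blk mem f) (hy : FY1 Blk mem f)
    (hsub : ∀ B, Blk B → Blk' B) : FloorsOK Blk' mem f ∧ FY1 Blk' mem f :=
  ⟨h.reblk (fun B _ hb => hsub B hb), hy.reblk (fun B _ hb => hsub B hb)⟩

/-- A callee's footprint (get_bits: fields of `*f` from `stream` on, and the stack) off the header and the floor block. -/
example (Blk : Block → Prop) (mem mem' : Mem) (f : Nat) (ws : List Span) (hok : BlkOK Blk) (hob : Blk (objBlock f))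
    (h : FloorsOK Blk mem f) (hs : Mem.SameExcept ws mem mem')
    (hdh : ∀ w, w ∈ ws → (floorHdr f).base + (floorHdr f).size ≤ w.lo ∨ w.hi ≤ (floorHdr f).base)
    (hdg : ∀ w, w ∈ ws → (floorBlock mem f).base + (floorBlock mem f).size ≤ w.lo ∨ w.hi ≤ (floorBlock mem f).base) :
    FloorsOK Blk mem' f := by
  have hfin := stb_vorbis_inside hok hob
  exact h.frame_of_bound (FloorHdrSame.of_same (Block.Same.of_sameExcept hs hdh) (by omega))
    (Block.Same.of_sameExcept hs hdg) (hok.no_wrap h.FL2)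

/-- One floor over a store that keeps the block of FL2: `Kept` of the block gives `Kept` of the element. -/
example (Blk : Block → Prop) (mem mem' : Mem) (f g : Nat) (h : FloorsOK Blk mem f) (hg : IsFloor mem f g)
    (hk : (floorBlock mem f).Kept mem mem') : Floor1OK mem' g (stb_vorbis.codebook_count mem f) :=
  (h.floor hg).frame (h.toFloorShape.elem_kept hg hk)

/-! ### (d) Establish -/

/-- Loop 4023, one iteration over the concrete store `g->sorted_order[n] = (uint8) p[n].id` (`mov [rbx + r12 + 838], al`):
PID bounds the byte, the older entries and `values` are other bytes of the element. -/
example (mem : Mem) (g P n : Nat) (hg : g + 1596 ≤ 0xC00000) (hpid : PID mem g P) (hso : SortedUpTo mem g n)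
    (hn : (n : Int) < Floor1.values mem g) (hv : Floor1.values mem g ≤ 250) :
    SortedUpTo (mem.writeLE (addr (g + n + 838)) 1 (stbv__floor_ordering.id mem (pAt P n))) g (n + 1) := by
  have hb := hpid.byte hn hv
  have ea : (addr (g + n + 838)).toNat = g + n + 838 := toNat_addr _ (by omega)
  apply hso.step
  · simp only [vacc, voff]
    exact mem.i32_writeLE _ 1 _ _ (by omega) (by omega) (by omega)
  · intro q hq
    simp only [vacc, voff]
    exact mem.u8_writeLE _ 1 _ _ (by omega) (by omega) (by omega)
  · have e : Floor1.sorted_order (mem.writeLE (addr (g + n + 838)) 1 (stbv__floor_ordering.id mem (pAt P n))) g n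
        = stbv__floor_ordering.id mem (pAt P n) % 2 ^ 8 := by
      simp only [vacc, voff]
      have e2 : g + 838 + n = g + n + 838 := by omega
      rw [e2]
      exact mem.u8_writeLE_same _ _
    rw [e, hb.1]
    exact hb.2

/-- PID from loop 4015 through qsort (which writes only `p`, so `values` is unchanged) to FL9's hypothesis. -/
example (mem mem' : Mem) (g P n : Nat) (hfill : PFill mem P n) (hn : (n : Int) = Floor1.values mem g)
    (hv : Floor1.values mem' g = Floor1.values mem g)
    (hq : RecordsPreserved mem mem' P Off.sizeof.stbv__floor_ordering n) : PID mem' g P :=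
  (PID.of_fill hfill (by omega)).of_records hv hn hq

/-- Loop 4026: FL10 for `j` from the contract of `neighbors` (`low`, `hi` = the two stack dwords, `0` before the call). -/
example (mem mem' : Mem) (g j low hi : Nat) (hxl : XL mem g) (h2 : 2 ≤ j) (hj : (j : Int) < Floor1.values mem g)
    (hv : Floor1.values mem g ≤ 250)
    (hlow : (∃ i, i < j ∧ Floor1.Xlist mem g i < Floor1.Xlist mem g j) →
      low < j ∧ Floor1.Xlist mem g low < Floor1.Xlist mem g j)
    (hlow0 : ¬ (∃ i, i < j ∧ Floor1.Xlist mem g i < Floor1.Xlist mem g j) → low = 0)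
    (hhi : (∃ i, i < j ∧ Floor1.Xlist mem g j < Floor1.Xlist mem g i) →
      hi < j ∧ Floor1.Xlist mem g j < Floor1.Xlist mem g hi)
    (hn0 : Floor1.neighbors mem' g j 0 = low % 2 ^ 8) (hn1 : Floor1.neighbors mem' g j 1 = hi % 2 ^ 8)
    (hx : ∀ i : Nat, i ≤ j → Floor1.Xlist mem' g i = Floor1.Xlist mem g i) : NbOK mem' g j :=
  NbOK.of_post hxl h2 (by omega) (by omega) hlow hlow0 hhi hn0 hn1 hx

/-- The Σ loop 4007: one more partition done (`k` reached `class_dimensions[pcl[j]]`). -/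
example (mem : Mem) (g j : Nat) (v : Int)
    (hv : v = 2 + (Floor1.dimSum mem g j : Int) + Floor1.class_dimensions mem g (Floor1.partition_class_list mem g j)) :
    v = 2 + (Floor1.dimSum mem g (j + 1) : Int) := by
  rw [Floor1.dimSum_succ]
  omega

/-- Loop 3966: the end of iteration `n`, then the exit. -/
example (Blk : Block → Prop) (mem : Mem) (f n : Nat) (h : FloorsUpTo Blk mem f n)
    (h3 : stb_vorbis.floor_types mem f n = 1)
    (hnew : Floor1OK mem (stb_vorbis.floor_config_at mem f n) (stb_vorbis.codebook_count mem f))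
    (hlast : stb_vorbis.floor_count mem f ≤ ((n + 1 : Nat) : Int)) : FloorsOK Blk mem f :=
  (h.step h3 hnew).done hlast

/-- Loop 3966, a store into element `n` (a byte of its `partition_class_list`): the header fields are in `*f`, the elements below
`n` are other parts of the floor block (`elems_disjoint`), so `FloorsUpTo … n` is kept. -/
example (Blk : Block → Prop) (mem : Mem) (f n j v : Nat) (hok : BlkOK Blk) (hob : Blk (objBlock f))
    (h : FloorsUpTo Blk mem f n) (hn : (n : Int) < stb_vorbis.floor_count mem f) (hj : j < 32)
    (hd : (objBlock f).disjoint (floorBlock mem f)) :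
    FloorsUpTo Blk (mem.writeLE (addr (stb_vorbis.floor_config_at mem f n + 1 + j)) 1 v) f n := by
  have hfin := stb_vorbis_inside hok hob
  have hgn : IsFloor mem f (stb_vorbis.floor_config_at mem f n) := IsFloor.of_lt hn
  have hnin := h.toFloorShape.elem_inside hgn hok
  -- the store is inside element `n`
  have hin : (Block.mk (stb_vorbis.floor_config_at mem f n) Off.sizeof.Floor).contains
      (stb_vorbis.floor_config_at mem f n + 1 + j) 1 := by
    simp only [vblock, voff]
    omega
  -- element `n` is a part of the floor block, which is disjoint from `*f`
  have hnb := h.toFloorShape.elem_in hgn (off := 0) (n := Off.sizeof.Floor) (Nat.le_refl _)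
  simp only [Block.contains, Nat.add_zero] at hnb
  have hdh : (floorHdr f).disjoint (Block.mk (stb_vorbis.floor_config_at mem f n) Off.sizeof.Floor) := by
    have := floorHdr_disjoint hd
    simp only [vblock] at this hnb ⊢
    omega
  have hh : FloorHdrSame mem (mem.writeLE (addr (stb_vorbis.floor_config_at mem f n + 1 + j)) 1 v) f :=
    FloorHdrSame.of_same (Block.Same.of_writeLE mem _ 1 v hdh hin (by simp only [voff] at hnin ⊢; omega)) (by omega)
  apply h.frame hh.floor_count hh.floor_config hh.codebook_count
  · intro i hi
    exact hh.floor_types i (by have := h.FL1; simp only [voff]; omega)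
  · intro i hi
    have hgi : IsFloor mem f (stb_vorbis.floor_config_at mem f i) := IsFloor.of_lt (by omega)
    have hiin := h.toFloorShape.elem_inside hgi hok
    exact Block.Kept.of_writeLE mem _ 1 v (FloorShape.elems_disjoint mem f (by omega)) hin
      (by simp only [voff] at hnin ⊢; omega) (by simp only [voff] at hiin ⊢; omega)

/-- The channel loop 4161 over the allocation of the next channel's block: the pointers below `n` are kept (`of_eq`), the
arena's block predicate grew (`reblk`), the new pointer is the new block (`step`). -/
example (Blk Blk' : Block → Prop) (mem mem' : Mem) (f n : Nat) (L : Int) (hy : FYUpTo Blk mem f L n)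
    (hptr : ∀ c : Nat, c < n → stb_vorbis.finalY mem' f c = stb_vorbis.finalY mem f c) (hsub : ∀ B, Blk B → Blk' B)
    (hnew : Blk' ⟨stb_vorbis.finalY mem' f n, 2 * L.toNat⟩) : FYUpTo Blk' mem' f L (n + 1) :=
  ((hy.of_eq hptr).reblk (fun _ _ hb => hsub _ hb)).step hnew

/-- FY1 at SD.10. -/
example (Blk : Block → Prop) (mem : Mem) (f : Nat) (L : Int)
    (hy : FYUpTo Blk mem f L (stb_vorbis.channels mem f).toNat)
    (hL : LongestOK mem f (stb_vorbis.floor_count mem f).toNat L) : FY1 Blk mem f :=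
  FY1.of_upTo hy (by omega) hL (by omega)

/-! ### (e) The signatures the top of the invariant is stated with (Vorbis/Blocks.lean §5) -/

/-- The group FL1 … FL10 follows the object through `*f = p`. -/
example : Group.Moves FloorsOK := by
  intro Blk Blk' mem mem' p f hm h
  apply h.transfer (hm.objEq (by decide))
  · intro B hR
    exact hm.kept (h.reads_blk hR)
  · intro B _ hb
    exact hm.sub B hb

/-- The group FL1 … FL10 has the coarse frame: every allocated block is kept (`*f` is one of them), no block was freed. -/
example : Group.Carries FloorsOK := by
  intro Blk Blk' mem mem' f hall hsub hob h
  have hkf := hall _ hob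
  have hf := hkf.inside
  simp only [vblock] at hf
  apply h.transfer (ObjEq.of_same hkf.same hf (by decide))
  · intro B hR
    exact hall B (h.reads_blk hR)
  · intro B _ hb
    exact hsub B hb

/-- FY1 has the coarse frame GIVEN FL1 + FL2 and `channels ≤ 16` (HD1) of the same state. -/
example (Blk Blk' : Block → Prop) (mem mem' : Mem) (f : Nat) (hall : AllKept Blk mem mem') (hsub : ∀ B, Blk B → Blk' B)
    (hob : Blk (objBlock f)) (hshape : FloorShape Blk mem f) (hC : stb_vorbis.channels mem f ≤ 16) (hy : FY1 Blk mem f) :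
    FY1 Blk' mem' f := by
  have hkf := hall _ hob
  have hf := hkf.inside
  simp only [vblock] at hf
  apply hy.transfer hshape hC (ObjEq.of_same hkf.same hf (by decide))
  · intro B hR
    cases hR with
    | config => exact hall _ hshape.FL2
  · intro B _ hb
    exact hsub B hb

/-! ### No axiom beyond Lean's three -/

#print axioms FloorsOK.transfer
#print axioms FloorsOK.frame
#print axioms FloorsOK.store
#print axioms FY1.transfer
#print axioms FY1.store
#print axioms Floor1OK.of_transients
#print axioms PID.of_records
#print axioms NbOK.of_post
#print axioms Floor1OK.adx_pos
#print axioms FloorShape.site_subclass_books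
#print axioms RangeListOK.value
#print axioms mul_i16_u8_bound

end Vorbis.FloorTest
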